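-- pv_equiv track=rewrite | github.com/felixchess5/RT-Capstone | src/security/security_manager.py | _detect_repetition_attack
-- ===== SOURCE A (Python) =====
-- from collections import defaultdict, deque
--
-- def _detect_repetition_attack(content: str) -> bool:
--     """Detect repetition-based prompt injection attacks."""
--     lines = content.split('\n')
--     if len(lines) < 10:
--         return False
--
--     # Check for repeated identical lines
--     line_counts = defaultdict(int)
--     for line in lines:
--         line_counts[line.strip()] += 1
--
--     # If any line is repeated more than 5 times, it's suspicious
--     return any(count > 5 for count in line_counts.values())
-- ===== SOURCE B (Python) =====
-- def _detect_repetition_attack(content: str) -> bool: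
--     """Detect repetition-based prompt injection attacks."""
--     lines = content.split('\n')
--     if len(lines) < 10:
--         return False
--     stripped = sorted(line.strip() for line in lines)
--     run = 1
--     for i in range(1, len(stripped)):
--         run = run + 1 if stripped[i] == stripped[i - 1] else 1
--         if run > 5:
--             return True
--     return False
-- ===== Notes on version B (the rewrite author's own statement) =====
-- stated objective: alternative
-- what changed: Replaces the dict-based counting pass plus any() over counts with a sort of the stripped lines followed by a single consecutive-run-length scan with early exit.
import Mathlib
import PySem

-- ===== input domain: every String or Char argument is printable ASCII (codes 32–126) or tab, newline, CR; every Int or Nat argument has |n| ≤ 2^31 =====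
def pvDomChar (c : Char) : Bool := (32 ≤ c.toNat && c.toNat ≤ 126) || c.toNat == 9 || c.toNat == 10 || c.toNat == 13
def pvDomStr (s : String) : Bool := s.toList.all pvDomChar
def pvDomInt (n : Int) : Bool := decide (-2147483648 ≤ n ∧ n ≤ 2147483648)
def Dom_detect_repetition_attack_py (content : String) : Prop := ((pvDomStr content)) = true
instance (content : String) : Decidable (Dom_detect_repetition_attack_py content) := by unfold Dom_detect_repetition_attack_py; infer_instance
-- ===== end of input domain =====

-- B replaces A's dict-counting pass with a sort of the stripped lines and a consecutive-run-length scan (same results; alternative algorithm).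

-- ===== PORT A =====
def detect_repetition_attack_py (content : String) : Bool :=
  -- content.split('\n'): sep is the nonempty literal, so split? is always some
  let lines := (PySem.Str.split? content "\n").getD []
  if lines.length < 10 then false
  else
    let line_counts : PySem.Dict String Int :=
      lines.foldl (fun d line => d.modify (PySem.Str.strip line) 0 (· + 1)) PySem.Dict.empty
    line_counts.values.any (fun count => decide (count > 5))

-- ===== PORT B =====
-- run-length scan over the sorted stripped lines: run is the length of the current block
def pvRunScan : String → Nat → List String → Bool
  | _, _, [] => false
  | prev, run, cur :: rest =>
      let run' := if cur == prev then run + 1 else 1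
      if run' > 5 then true else pvRunScan cur run' rest

def detect_repetition_attack_py_alt (content : String) : Bool :=
  let lines := (PySem.Str.split? content "\n").getD []
  if lines.length < 10 then false
  else
    match PySem.List.sorted (lines.map PySem.Str.strip) (fun x => x) false with
    | [] => false
    | h :: t => pvRunScan h 1 t

-- ===== PRECONDITION & SPEC =====
def Spec_detect_repetition_attack_py (content : String) (out : Bool) : Prop := out = detect_repetition_attack_py_alt content
instance (content : String) (out : Bool) : Decidable (Spec_detect_repetition_attack_py content out) := by unfold Spec_detect_repetition_attack_py; infer_instance

-- ===== CLAIM (what is proved, stated in full; the proofs are below) =====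
def Claim_equal_detect_repetition_attack_py : Prop := ∀ (content : String), Dom_detect_repetition_attack_py content → Spec_detect_repetition_attack_py content (detect_repetition_attack_py content)

-- ===== LEMMAS AND PROOFS =====

-- run-length scan on a ≤-sorted tail: finds a block longer than 5 iff some value's count exceeds 5
theorem pvRunScan_spec (rest : List String) : ∀ (prev : String) (run : Nat),
    (prev :: rest).Pairwise (· ≤ ·) → run ≤ 5 →
    pvRunScan prev run rest
      = decide (run + rest.count prev > 5 ∨ ∃ x ∈ rest, x ≠ prev ∧ rest.count x > 5) := by
  induction rest with
  | nil => intro prev run _ h5; simp [pvRunScan]; omega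
  | cons c rs ih =>
    intro prev run hp h5
    rw [List.pairwise_cons] at hp
    obtain ⟨hle, hp'⟩ := hp
    by_cases hc : c = prev
    · subst hc
      by_cases h6 : run + 1 > 5
      · simp [pvRunScan, h6, List.count_cons_self]
        left; omega
      · have hrec := ih c (run + 1) hp' (by omega)
        have hstep : pvRunScan c run (c :: rs) = pvRunScan c (run + 1) rs := by
          simp [pvRunScan, h6]
        rw [hstep, hrec, decide_eq_decide]
        constructor
        · rintro (h | ⟨x, hx, hxc, hcnt⟩)
          · left; simp [List.count_cons_self]; omega
          · right
            refine ⟨x, List.mem_cons_of_mem _ hx, hxc, ?_⟩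
            simp [List.count_cons]
            split_ifs with hce
            · exact absurd hce.symm hxc
            · omega
        · rintro (h | ⟨x, hx, hxc, hcnt⟩)
          · left; simp [List.count_cons_self] at h; omega
          · right
            rcases List.mem_cons.mp hx with rfl | hx'
            · exact absurd rfl hxc
            · refine ⟨x, hx', hxc, ?_⟩
              simp [List.count_cons] at hcnt
              split_ifs at hcnt with hce
              · exact absurd hce.symm hxc
              · omega
    · have hlt : ∀ y ∈ c :: rs, prev < y := by
        intro y hy
        rcases List.mem_cons.mp hy with rfl | hy'
        · exact lt_of_le_of_ne (hle _ (List.mem_cons_self)) (fun h => hc h.symm)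
        · have h1 : prev < c := lt_of_le_of_ne (hle _ (List.mem_cons_self)) (fun h => hc h.symm)
          have h2 : c ≤ y := (List.pairwise_cons.mp hp').1 _ hy'
          exact lt_of_lt_of_le h1 h2
      have hnm : prev ∉ c :: rs := fun h => lt_irrefl _ (hlt _ h)
      have hc0 : (c :: rs).count prev = 0 := List.count_eq_zero.mpr hnm
      have hrec := ih c 1 hp' (by omega)
      have hstep : pvRunScan prev run (c :: rs) = pvRunScan c 1 rs := by
        simp [pvRunScan, hc]
      rw [hstep, hrec, decide_eq_decide]
      constructor
      · rintro (h | ⟨x, hx, hxc, hcnt⟩)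
        · refine Or.inr ⟨c, List.mem_cons_self, fun h' => hc h', ?_⟩
          simp [List.count_cons_self]; omega
        · refine Or.inr ⟨x, List.mem_cons_of_mem _ hx,
            fun h' => hnm (h' ▸ List.mem_cons_of_mem _ hx), ?_⟩
          simp [List.count_cons]
          split_ifs with hce
          · exact absurd hce.symm hxc
          · omega
      · rintro (h | ⟨x, hx, hxp, hcnt⟩)
        · rw [hc0] at h; omega
        · by_cases hxc : x = c
          · subst hxc
            left
            simp [List.count_cons_self] at hcnt
            omega
          · right
            rcases List.mem_cons.mp hx with rfl | hx'
            · exact absurd rfl hxc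
            · refine ⟨x, hx', hxc, ?_⟩
              simp [List.count_cons] at hcnt
              split_ifs at hcnt with hce
              · exact absurd hce.symm hxc
              · omega

-- ===== VERDICT (by name: the statement is the Claim_ definition above) =====
theorem detect_repetition_attack_py_spec : Claim_equal_detect_repetition_attack_py := by
  intro content _
  unfold Spec_detect_repetition_attack_py detect_repetition_attack_py detect_repetition_attack_py_alt
  simp only []
  by_cases h10 : ((PySem.Str.split? content "\n").getD []).length < 10
  · simp [h10]
  · set lines := (PySem.Str.split? content "\n").getD [] with hl
    set stripped := lines.map PySem.Str.strip with hst
    simp only [h10, if_false]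
    -- A's fold builds exactly Counter(stripped)
    have hA : lines.foldl (fun d line => d.modify (PySem.Str.strip line) 0 (· + 1)) PySem.Dict.empty
        = PySem.Dict.counter stripped := by
      rw [PySem.Dict.counter_eq_foldl, hst, List.foldl_map]
    rw [hA]
    -- B's sorted list is nonempty
    have hne : stripped ≠ [] := by
      intro hemp
      rw [hst] at hemp
      have : lines.length = 0 := by simpa using congrArg List.length hemp
      omega
    rcases hss : PySem.List.sorted stripped (fun x => x) false with _ | ⟨h, t⟩
    · exact absurd ((PySem.List.sorted_eq_nil_iff _ _ _).mp hss) hne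
    · have hpw : (h :: t).Pairwise (fun a b : String => a ≤ b) := by
        have := PySem.List.sorted_pairwise stripped (fun x : String => x)
        rwa [hss] at this
      have hperm : (h :: t).Perm stripped := by
        have := PySem.List.sorted_perm stripped (fun x : String => x) false
        rwa [hss] at this
      rw [show (match h :: t with | [] => false | h :: t => pvRunScan h 1 t)
            = pvRunScan h 1 t from rfl,
          pvRunScan_spec t h 1 hpw (by omega), Bool.eq_iff_iff]
      have hcnt : ∀ x : String, (h :: t).count x = stripped.count x :=
        fun x => hperm.count_eq x
      constructor
      · intro hAny
        -- A found a key counted more than 5 times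
        rw [List.any_eq_true] at hAny
        obtain ⟨c, hcmem, hcgt⟩ := hAny
        have hcmem' : c ∈ (PySem.Dict.counter stripped).items.map (·.2) := by
          simpa [PySem.Dict.values] using hcmem
        rw [PySem.Dict.items_counter, List.map_map] at hcmem'
        obtain ⟨k, hk, hkc⟩ := List.mem_map.mp hcmem'
        have hkcnt : stripped.count k > 5 := by
          have : ((stripped.count k : Int) > 5) := by
            simp only [Function.comp] at hkc
            rw [hkc]
            exact of_decide_eq_true hcgt
          exact_mod_cast this
        rw [← hcnt] at hkcnt
        rw [decide_eq_true_eq]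
        by_cases hkh : k = h
        · subst hkh
          left
          rw [List.count_cons_self] at hkcnt
          omega
        · right
          have hkt : k ∈ t := by
            have : k ∈ h :: t := hperm.mem_iff.mpr ((PySem.Set.mem_ofList _ _).mp hk)
            rcases List.mem_cons.mp this with rfl | ht
            · exact absurd rfl hkh
            · exact ht
          refine ⟨k, hkt, hkh, ?_⟩
          rw [List.count_cons] at hkcnt
          split_ifs at hkcnt with hce
          · exact absurd (eq_of_beq hce).symm hkh
          · omega
      · intro hB
        rw [decide_eq_true_eq] at hB
        rw [List.any_eq_true]
        -- produce the repeated value as a counter key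
        have key : ∃ k, k ∈ stripped ∧ stripped.count k > 5 := by
          rcases hB with hrun | ⟨x, hx, hxh, hxc⟩
          · refine ⟨h, hperm.mem_iff.mp List.mem_cons_self, ?_⟩
            rw [← hcnt, List.count_cons_self]
            omega
          · refine ⟨x, hperm.mem_iff.mp (List.mem_cons_of_mem _ hx), ?_⟩
            rw [← hcnt, List.count_cons]
            split_ifs with hce
            · exact absurd (eq_of_beq hce).symm hxh
            · omega
        obtain ⟨k, hk, hkc⟩ := key
        refine ⟨(stripped.count k : Int), ?_, by simpa using hkc⟩
        simp only [PySem.Dict.values, PySem.Dict.items_counter, List.map_map]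
        exact List.mem_map.mpr ⟨k, (PySem.Set.mem_ofList _ _).mpr hk, rfl⟩
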